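-- pv_equiv track=rewrite | github.com/dsleo/pullback | src/pullback/extraction/numbering.py | _consume_group
-- ===== SOURCE A (Python) =====
-- def _consume_group(text: str, start: int, open_char: str, close_char: str) -> tuple[str | None, int]:
--     if start >= len(text) or text[start] != open_char:
--         return None, start
--     depth = 0
--     for idx in range(start, len(text)):
--         if text[idx] == open_char:
--             depth += 1
--         elif text[idx] == close_char:
--             depth -= 1
--             if depth == 0:
--                 return text[start + 1 : idx], idx + 1
--     return None, start
-- ===== SOURCE B (Python) =====
-- def _consume_group(text: str, start: int, open_char: str, close_char: str) -> tuple[str | None, int]: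
--     # Recursive descent: skip a nested group by recursing instead of counting depth.
--     if start >= len(text) or text[start] != open_char:
--         return None, start
--     idx = start + 1
--     while idx < len(text):
--         c = text[idx]
--         if c == open_char:
--             inner, nxt = _consume_group(text, idx, open_char, close_char)
--             if inner is None:
--                 return None, start
--             idx = nxt
--         elif c == close_char:
--             return text[start + 1 : idx], idx + 1
--         else:
--             idx += 1
--     return None, start
-- ===== Notes on version B (the rewrite author's own statement) =====
-- stated objective: alternative
-- what changed: Replaces the explicit depth-counter scan over range(start, len) by a recursive-descent walk that starts after the opening delimiter and recurses to consume each nested group, so no depth variable is maintained.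
import Mathlib
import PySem

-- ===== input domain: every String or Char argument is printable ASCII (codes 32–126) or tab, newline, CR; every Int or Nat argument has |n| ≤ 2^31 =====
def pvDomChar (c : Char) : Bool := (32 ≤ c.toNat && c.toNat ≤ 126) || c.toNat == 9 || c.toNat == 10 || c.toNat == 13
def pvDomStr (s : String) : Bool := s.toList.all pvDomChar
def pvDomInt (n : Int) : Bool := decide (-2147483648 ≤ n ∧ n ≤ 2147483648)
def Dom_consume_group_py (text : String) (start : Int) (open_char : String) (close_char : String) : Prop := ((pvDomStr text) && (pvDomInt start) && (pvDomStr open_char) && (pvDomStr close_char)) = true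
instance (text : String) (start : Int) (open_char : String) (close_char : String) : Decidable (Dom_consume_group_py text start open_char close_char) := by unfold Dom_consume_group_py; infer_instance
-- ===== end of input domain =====

-- B replaces A's depth-counter scan by a recursive-descent walk (no depth variable); alternative decomposition, same cost.

-- ===== PORT A =====
-- the 'for idx in range(start, len(text))' loop of A, carrying the depth counter
def pvALoop (cs : List Char) (oc cc : String) (s idx depth : Int) : Option String × Int :=
  if _h : idx < (cs.length : Int) then
    match PySem.List.pyGet? cs idx with
    | none => (none, s)   -- Python raises IndexError here; such inputs are outside Pre_
    | some c =>
      if String.mk [c] = oc then pvALoop cs oc cc s (idx + 1) (depth + 1)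
      else if String.mk [c] = cc then
        (if depth - 1 = 0 then (some (String.mk (PySem.List.slice cs (some (s + 1)) (some idx))), idx + 1)
         else pvALoop cs oc cc s (idx + 1) (depth - 1))
      else pvALoop cs oc cc s (idx + 1) depth
  else (none, s)
termination_by ((cs.length : Int) - idx).toNat
decreasing_by all_goals omega

def consume_group_py (text : String) (start : Int) (open_char : String) (close_char : String) : Option String × Int :=
  let cs := text.toList
  if (cs.length : Int) ≤ start then (none, start)
  else
    match PySem.List.pyGet? cs start with
    | none => (none, start)   -- Python raises IndexError here; such inputs are outside Pre_
    | some c =>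
      if ¬ (String.mk [c] = open_char) then (none, start)
      else pvALoop cs open_char close_char start start 0

-- ===== PORT B =====
-- recursive descent (Source B): bGo is _consume_group, bLoop its while-loop; fuel is
-- termination bookkeeping only (chosen large enough at the call site)
mutual
def pvBGo (cs : List Char) (oc cc : String) (start : Int) : Nat → Option String × Int
  | 0 => (none, start)
  | f + 1 =>
    if start < (cs.length : Int) then
      match PySem.List.pyGet? cs start with
      | none => (none, start)   -- Python raises IndexError here; such inputs are outside Pre_
      | some c =>
        if String.mk [c] = oc then pvBLoop cs oc cc start (start + 1) f
        else (none, start)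
    else (none, start)

def pvBLoop (cs : List Char) (oc cc : String) (s idx : Int) : Nat → Option String × Int
  | 0 => (none, s)
  | f + 1 =>
    if idx < (cs.length : Int) then
      match PySem.List.pyGet? cs idx with
      | none => (none, s)   -- Python raises IndexError here; such inputs are outside Pre_
      | some c =>
        if String.mk [c] = oc then
          match pvBGo cs oc cc idx f with
          | (none, _) => (none, s)
          | (some _, nxt) => pvBLoop cs oc cc s nxt f
        else if String.mk [c] = cc then
          (some (String.mk (PySem.List.slice cs (some (s + 1)) (some idx))), idx + 1)
        else pvBLoop cs oc cc s (idx + 1) f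
    else (none, s)
end

def consume_group_py_alt (text : String) (start : Int) (open_char : String) (close_char : String) : Option String × Int :=
  let cs := text.toList
  pvBGo cs open_char close_char start (2 * ((cs.length : Int) - start).toNat + 2)

-- ===== PRECONDITION & SPEC =====
-- Pre_ excludes exactly the inputs where Python's text[start] raises IndexError (start < -len(text) with start < len(text)); both A and B raise there.
def Pre_consume_group_py (text : String) (start : Int) (open_char : String) (close_char : String) : Prop :=
  PySem.Str.len text ≤ start ∨ -(PySem.Str.len text) ≤ start
instance (text : String) (start : Int) (open_char : String) (close_char : String) : Decidable (Pre_consume_group_py text start open_char close_char) := by unfold Pre_consume_group_py; infer_instance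
def pvWitness_consume_group_py : String × Int × String × String := ("(ab)", 0, "(", ")")

def Spec_consume_group_py (text : String) (start : Int) (open_char : String) (close_char : String) (out : Option String × Int) : Prop := out = consume_group_py_alt text start open_char close_char
instance (text : String) (start : Int) (open_char : String) (close_char : String) (out : Option String × Int) : Decidable (Spec_consume_group_py text start open_char close_char out) := by unfold Spec_consume_group_py; infer_instance

-- ===== CLAIM (what is proved, stated in full; the proofs are below) =====
def Claim_equal_consume_group_py : Prop := ∀ (text : String) (start : Int) (open_char : String) (close_char : String), Dom_consume_group_py text start open_char close_char → Pre_consume_group_py text start open_char close_char → Spec_consume_group_py text start open_char close_char (consume_group_py text start open_char close_char)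

-- ===== LEMMAS AND PROOFS =====

-- index of the close bringing the depth counter to 0 (abstraction of A's loop)
def pvCloseAt (cs : List Char) (oc cc : String) (idx depth : Int) : Option Int :=
  if _h : idx < (cs.length : Int) then
    match PySem.List.pyGet? cs idx with
    | none => none
    | some c =>
      if String.mk [c] = oc then pvCloseAt cs oc cc (idx + 1) (depth + 1)
      else if String.mk [c] = cc then
        (if depth - 1 = 0 then some idx else pvCloseAt cs oc cc (idx + 1) (depth - 1))
      else pvCloseAt cs oc cc (idx + 1) depth
  else none
termination_by ((cs.length : Int) - idx).toNat
decreasing_by all_goals omega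

-- common value of both loops from position idx at depth 1, with group start s
def pvA1 (cs : List Char) (oc cc : String) (s idx : Int) : Option String × Int :=
  match pvCloseAt cs oc cc idx 1 with
  | some j => (some (String.mk (PySem.List.slice cs (some (s + 1)) (some j))), j + 1)
  | none => (none, s)

-- value of Source B's _consume_group with ample fuel
def pvGoSpec (cs : List Char) (oc cc : String) (s : Int) : Option String × Int :=
  if s < (cs.length : Int) then
    match PySem.List.pyGet? cs s with
    | none => (none, s)
    | some c => if String.mk [c] = oc then pvA1 cs oc cc s (s + 1) else (none, s)
  else (none, s)

theorem pvALoop_eq_aux (cs : List Char) (oc cc : String) :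
    ∀ (k : Nat) (s idx depth : Int), ((cs.length : Int) - idx).toNat ≤ k →
      pvALoop cs oc cc s idx depth =
        (match pvCloseAt cs oc cc idx depth with
         | some j => (some (String.mk (PySem.List.slice cs (some (s + 1)) (some j))), j + 1)
         | none => (none, s)) := by
  intro k
  induction k with
  | zero =>
    intro s idx depth hk
    rw [pvALoop, pvCloseAt]
    have : ¬ idx < (cs.length : Int) := by omega
    simp [this]
  | succ k ih =>
    intro s idx depth hk
    rw [pvALoop, pvCloseAt]
    by_cases h : idx < (cs.length : Int)
    · simp only [h, dif_pos]
      cases hg : PySem.List.pyGet? cs idx with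
      | none => simp
      | some c =>
        by_cases h1 : String.mk [c] = oc
        · simp only [if_pos h1]
          exact ih s (idx + 1) (depth + 1) (by omega)
        · by_cases h2 : String.mk [c] = cc
          · simp only [if_neg h1, if_pos h2]
            by_cases h3 : depth - 1 = 0
            · simp [h3]
            · simp only [if_neg h3]
              exact ih s (idx + 1) (depth - 1) (by omega)
          · simp only [if_neg h1, if_neg h2]
            exact ih s (idx + 1) depth (by omega)
    · simp [h]

theorem pvALoop_eq (cs : List Char) (oc cc : String) (s idx depth : Int) :
    pvALoop cs oc cc s idx depth =
      (match pvCloseAt cs oc cc idx depth with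
       | some j => (some (String.mk (PySem.List.slice cs (some (s + 1)) (some j))), j + 1)
       | none => (none, s)) :=
  pvALoop_eq_aux cs oc cc _ s idx depth le_rfl

theorem pvCloseAt_some_aux (cs : List Char) (oc cc : String) :
    ∀ (k : Nat) (idx depth j : Int), ((cs.length : Int) - idx).toNat ≤ k →
      pvCloseAt cs oc cc idx depth = some j → idx ≤ j ∧ j < (cs.length : Int) := by
  intro k
  induction k with
  | zero =>
    intro idx depth j hk h
    rw [pvCloseAt] at h
    have : ¬ idx < (cs.length : Int) := by omega
    simp [this] at h
  | succ k ih =>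
    intro idx depth j hk h
    rw [pvCloseAt] at h
    by_cases hlt : idx < (cs.length : Int)
    · simp only [hlt, dif_pos] at h
      cases hg : PySem.List.pyGet? cs idx with
      | none => rw [hg] at h; simp at h
      | some c =>
        rw [hg] at h
        by_cases h1 : String.mk [c] = oc
        · simp only [if_pos h1] at h
          have := ih (idx + 1) (depth + 1) j (by omega) h
          omega
        · by_cases h2 : String.mk [c] = cc
          · simp only [if_neg h1, if_pos h2] at h
            by_cases h3 : depth - 1 = 0
            · simp [h3] at h; omega
            · simp only [if_neg h3] at h
              have := ih (idx + 1) (depth - 1) j (by omega) h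
              omega
          · simp only [if_neg h1, if_neg h2] at h
            have := ih (idx + 1) depth j (by omega) h
            omega
    · simp [hlt] at h

theorem pvCloseAt_some (cs : List Char) (oc cc : String) (idx depth j : Int)
    (h : pvCloseAt cs oc cc idx depth = some j) : idx ≤ j ∧ j < (cs.length : Int) :=
  pvCloseAt_some_aux cs oc cc _ idx depth j le_rfl h

-- depth decomposition: a depth-(d+1) search is a depth-1 search followed by a depth-d search
theorem pvCloseAt_decomp_aux (cs : List Char) (oc cc : String) :
    ∀ (k : Nat) (idx d : Int), ((cs.length : Int) - idx).toNat ≤ k → 0 < d →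
      pvCloseAt cs oc cc idx (d + 1) =
        (pvCloseAt cs oc cc idx 1).bind (fun j => pvCloseAt cs oc cc (j + 1) d) := by
  intro k
  induction k with
  | zero =>
    intro idx d hk hd
    have : ¬ idx < (cs.length : Int) := by omega
    rw [pvCloseAt]
    conv_rhs => rw [pvCloseAt]
    simp [this]
  | succ k ih =>
    intro idx d hk hd
    by_cases hlt : idx < (cs.length : Int)
    · rw [pvCloseAt]
      conv_rhs => rw [pvCloseAt]
      simp only [hlt, dif_pos]
      cases hg : PySem.List.pyGet? cs idx with
      | none => simp
      | some c =>
        by_cases h1 : String.mk [c] = oc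
        · simp only [if_pos h1]
          -- LHS: pvCloseAt (idx+1) (d+2); RHS: (pvCloseAt (idx+1) 2).bind …
          have e1 : pvCloseAt cs oc cc (idx + 1) (d + 1 + 1) =
              (pvCloseAt cs oc cc (idx + 1) 1).bind (fun j => pvCloseAt cs oc cc (j + 1) (d + 1)) :=
            ih (idx + 1) (d + 1) (by omega) (by omega)
          have e2 : pvCloseAt cs oc cc (idx + 1) (1 + 1) =
              (pvCloseAt cs oc cc (idx + 1) 1).bind (fun j => pvCloseAt cs oc cc (j + 1) 1) :=
            ih (idx + 1) 1 (by omega) (by omega)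
          rw [e1, e2, Option.bind_assoc]
          cases hc : pvCloseAt cs oc cc (idx + 1) 1 with
          | none => simp
          | some j =>
            have hj := pvCloseAt_some cs oc cc (idx + 1) 1 j hc
            simp only [Option.bind_some]
            exact ih (j + 1) d (by omega) hd
        · by_cases h2 : String.mk [c] = cc
          · simp only [if_neg h1, if_pos h2]
            have hne : ¬ (d + 1 - 1 = 0) := by omega
            simp only [if_neg hne]
            simp
          · simp only [if_neg h1, if_neg h2]
            exact ih (idx + 1) d (by omega) hd
    · rw [pvCloseAt]
      conv_rhs => rw [pvCloseAt]
      simp [hlt]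

theorem pvCloseAt_decomp (cs : List Char) (oc cc : String) (idx d : Int) (hd : 0 < d) :
    pvCloseAt cs oc cc idx (d + 1) =
      (pvCloseAt cs oc cc idx 1).bind (fun j => pvCloseAt cs oc cc (j + 1) d) :=
  pvCloseAt_decomp_aux cs oc cc _ idx d le_rfl hd

theorem pvB_eq (cs : List Char) (oc cc : String) :
    ∀ (f : Nat),
      (∀ (s : Int), 2 * ((cs.length : Int) - s).toNat ≤ f → pvBGo cs oc cc s f = pvGoSpec cs oc cc s) ∧
      (∀ (s idx : Int), 2 * ((cs.length : Int) - idx).toNat + 1 ≤ f → pvBLoop cs oc cc s idx f = pvA1 cs oc cc s idx) := by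
  intro f
  induction f with
  | zero =>
    constructor
    · intro s hs
      have : ¬ s < (cs.length : Int) := by omega
      simp [pvBGo, pvGoSpec, this]
    · intro s idx h
      omega
  | succ f ih =>
    constructor
    · -- pvBGo (f+1)
      intro s hs
      rw [pvBGo, pvGoSpec]
      by_cases hlt : s < (cs.length : Int)
      · simp only [hlt, if_pos, if_true]
        cases hg : PySem.List.pyGet? cs s with
        | none => simp
        | some c =>
          by_cases h1 : String.mk [c] = oc
          · simp only [if_pos h1]
            exact ih.2 s (s + 1) (by omega)
          · simp [h1]
      · simp [hlt]
    · -- pvBLoop (f+1)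
      intro s idx h
      rw [pvBLoop]
      by_cases hlt : idx < (cs.length : Int)
      · simp only [hlt, if_pos, if_true]
        cases hg : PySem.List.pyGet? cs idx with
        | none =>
          rw [pvA1, pvCloseAt]
          simp [hlt, hg]
        | some c =>
          by_cases h1 : String.mk [c] = oc
          · simp only [if_pos h1]
            have hgo : pvBGo cs oc cc idx f = pvGoSpec cs oc cc idx := ih.1 idx (by omega)
            rw [hgo]
            have hspec : pvGoSpec cs oc cc idx = pvA1 cs oc cc idx (idx + 1) := by
              rw [pvGoSpec]; simp [hlt, hg, h1]
            rw [hspec]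
            have hclose : pvCloseAt cs oc cc idx 1 =
                (pvCloseAt cs oc cc (idx + 1) 1).bind (fun j => pvCloseAt cs oc cc (j + 1) 1) := by
              have : pvCloseAt cs oc cc idx 1 = pvCloseAt cs oc cc (idx + 1) (1 + 1) := by
                rw [pvCloseAt]; simp [hlt, hg, h1]
              rw [this]
              exact pvCloseAt_decomp cs oc cc (idx + 1) 1 (by omega)
            rw [pvA1, pvA1, hclose]
            cases hc : pvCloseAt cs oc cc (idx + 1) 1 with
            | none => simp
            | some j =>
              have hj := pvCloseAt_some cs oc cc (idx + 1) 1 j hc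
              simp only [Option.bind_some]
              have := ih.2 s (j + 1) (by omega)
              rw [this, pvA1]
          · by_cases h2 : String.mk [c] = cc
            · simp only [if_neg h1, if_pos h2]
              rw [pvA1]
              have hcl : pvCloseAt cs oc cc idx 1 = some idx := by
                rw [pvCloseAt]
                simp only [dif_pos hlt, hg, if_neg h1, if_pos h2]
                norm_num
              rw [hcl]
            · simp only [if_neg h1, if_neg h2]
              have hb := ih.2 s (idx + 1) (by omega)
              rw [hb]
              have hcl : pvCloseAt cs oc cc idx 1 = pvCloseAt cs oc cc (idx + 1) 1 := by
                rw [pvCloseAt]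
                simp only [dif_pos hlt, hg, if_neg h1, if_neg h2]
              rw [pvA1, pvA1, hcl]
      · rw [pvA1, pvCloseAt]
        simp [hlt]

-- ===== VERDICT (by name: the statement is the Claim_ definition above) =====
theorem consume_group_py_spec : Claim_equal_consume_group_py := by
  intro text start oc cc _hDom _hPre
  unfold Spec_consume_group_py consume_group_py consume_group_py_alt
  set cs := text.toList with hcs
  have hfuel := (pvB_eq cs oc cc (2 * ((cs.length : Int) - start).toNat + 2)).1 start (by omega)
  rw [hfuel, pvGoSpec]
  by_cases hge : (cs.length : Int) ≤ start
  · have : ¬ start < (cs.length : Int) := by omega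
    simp [hge, this]
  · have hlt : start < (cs.length : Int) := by omega
    simp only [hge, if_neg, if_false, hlt, if_pos, if_true]
    cases hg : PySem.List.pyGet? cs start with
    | none => simp
    | some c =>
      by_cases h1 : String.mk [c] = oc
      · simp only [h1, if_pos, not_true, if_neg, if_false, ite_false]
        have ha := pvALoop_eq cs oc cc start start 0
        have hstep : pvCloseAt cs oc cc start 0 = pvCloseAt cs oc cc (start + 1) 1 := by
          rw [pvCloseAt]; simp [hlt, hg, h1]
        rw [ha, hstep, pvA1]
      · simp [h1]
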